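-- pv_equiv track=rewrite | github.com/Tamim-EEE/Tamim-Islam_01825373231 | src/tokenizer.py | split_hl7_messages
-- ===== SOURCE A (Python) =====
-- from typing import List, Optional
--
-- def split_hl7_messages(content: str) -> List[str]:
--     """
--     Split file content containing multiple HL7 messages.
--
--     Messages are separated by MSH segments. This function identifies
--     message boundaries and returns individual message strings.
--
--     Args:
--         content: File content potentially containing multiple messages
--
--     Returns:
--         List of individual message strings
--     """
--     # Normalize line endings first
--     normalized = content.replace("\r\n", "\n").replace("\r", "\n")
--
--     # Find all MSH positions
--     lines = normalized.split("\n")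
--     messages = []
--     current_message_lines = []
--
--     for line in lines:
--         stripped = line.strip()
--         if not stripped:
--             continue
--
--         # New message starts with MSH
--         if stripped.startswith("MSH"):
--             # Save previous message if exists
--             if current_message_lines:
--                 messages.append("\n".join(current_message_lines))
--             current_message_lines = [stripped]
--         else:
--             # Continue current message
--             if current_message_lines:
--                 current_message_lines.append(stripped)
--
--     # Don't forget the last message
--     if current_message_lines:
--         messages.append("\n".join(current_message_lines))
--
--     return messages
-- ===== SOURCE B (Python) =====
-- def split_hl7_messages(content):
--     """Split HL7 content into messages at MSH segment boundaries.
--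
--     Two-pointer index scan over the cleaned line list instead of an
--     accumulator loop: find each MSH boundary, slice up to the next one.
--     """
--     normalized = content.replace("\r\n", "\n").replace("\r", "\n")
--     lines = [s for s in (l.strip() for l in normalized.split("\n")) if s]
--     n = len(lines)
--     msgs = []
--     i = 0
--     while i < n and not lines[i].startswith("MSH"):
--         i += 1
--     while i < n:
--         j = i + 1
--         while j < n and not lines[j].startswith("MSH"):
--             j += 1
--         msgs.append("\n".join(lines[i:j]))
--         i = j
--     return msgs
-- ===== Notes on version B (the rewrite author's own statement) =====
-- stated objective: alternative
-- what changed: Replaces A's accumulator loop (current-message list carried through one pass) with a cleaned line list plus a two-pointer index scan that slices each message from one MSH boundary to the next.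
import Mathlib
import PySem

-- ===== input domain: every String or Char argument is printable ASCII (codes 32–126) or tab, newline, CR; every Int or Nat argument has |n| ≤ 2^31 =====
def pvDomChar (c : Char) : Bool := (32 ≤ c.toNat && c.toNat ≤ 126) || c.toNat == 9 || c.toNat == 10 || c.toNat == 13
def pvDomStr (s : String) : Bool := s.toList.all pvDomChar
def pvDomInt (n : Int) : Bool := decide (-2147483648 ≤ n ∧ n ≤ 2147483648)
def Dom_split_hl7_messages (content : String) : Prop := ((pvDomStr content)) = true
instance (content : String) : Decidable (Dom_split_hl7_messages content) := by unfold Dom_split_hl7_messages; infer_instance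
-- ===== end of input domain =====

-- B replaces A's accumulator loop (current-message list carried through one pass) with a
-- cleaned line list plus a two-pointer index scan slicing each message from one MSH
-- boundary to the next (alternative decomposition, same cost).

-- ===== PORT A =====
-- loop body of A's 'for line in lines'
def pvStepA (acc : List String × List String) (line : String) : List String × List String :=
  let stripped := PySem.Str.strip line
  if stripped = "" then acc
  else if PySem.Str.startswith stripped "MSH" then
    ((if acc.2 ≠ [] then acc.1 ++ [PySem.Str.join "\n" acc.2] else acc.1), [stripped])
  else
    (acc.1, if acc.2 ≠ [] then acc.2 ++ [stripped] else acc.2)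

def split_hl7_messages (content : String) : List String :=
  let normalized := PySem.Str.replace (PySem.Str.replace content "\r\n" "\n") "\r" "\n"
  let lines := (PySem.Str.split? normalized "\n").getD []
  let acc := lines.foldl pvStepA ([], [])
  if acc.2 ≠ [] then acc.1 ++ [PySem.Str.join "\n" acc.2] else acc.1

-- ===== PORT B =====
def pvIsMSH (l : String) : Bool := PySem.Str.startswith l "MSH"

-- 'while i < n and not lines[i].startswith("MSH"): i += 1'  (returns the final i)
def pvSkip (lines : List String) (i : Nat) : Nat :=
  if h : i < lines.length then
    if pvIsMSH lines[i] then i else pvSkip lines (i + 1)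
  else i
termination_by lines.length - i
decreasing_by exact Nat.sub_succ_lt_self lines.length i h

-- needed by pvOuter's termination proof
theorem pvSkip_ge (lines : List String) (i : Nat) : i ≤ pvSkip lines i := by
  unfold pvSkip
  split
  · split
    · exact le_refl i
    · exact le_trans (Nat.le_succ i) (pvSkip_ge lines (i + 1))
  · exact le_refl i
termination_by lines.length - i
decreasing_by omega

-- 'while i < n: j = <skip from i+1>; msgs.append("\n".join(lines[i:j])); i = j'
def pvOuter (lines : List String) (i : Nat) : List String :=
  if h : i < lines.length then
    PySem.Str.join "\n"
        (PySem.List.slice lines (some (i : Int)) (some ((pvSkip lines (i + 1)) : Int))) ::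
      pvOuter lines (pvSkip lines (i + 1))
  else []
termination_by lines.length - i
decreasing_by
  exact Nat.lt_of_le_of_lt (Nat.sub_le_sub_left (pvSkip_ge lines (i + 1)) lines.length)
    (Nat.sub_succ_lt_self lines.length i h)

def split_hl7_messages_alt (content : String) : List String :=
  let normalized := PySem.Str.replace (PySem.Str.replace content "\r\n" "\n") "\r" "\n"
  let lines := (((PySem.Str.split? normalized "\n").getD []).map PySem.Str.strip).filter (fun s => s ≠ "")
  pvOuter lines (pvSkip lines 0)

-- ===== PRECONDITION & SPEC =====
def Spec_split_hl7_messages (content : String) (out : List String) : Prop := out = split_hl7_messages_alt content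
instance (content : String) (out : List String) : Decidable (Spec_split_hl7_messages content out) := by unfold Spec_split_hl7_messages; infer_instance

-- ===== CLAIM (what is proved, stated in full; the proofs are below) =====
def Claim_equal_split_hl7_messages : Prop := ∀ (content : String), Dom_split_hl7_messages content → Spec_split_hl7_messages content (split_hl7_messages content)

-- ===== LEMMAS AND PROOFS =====

-- lines that do NOT start a new message
def pvP : String → Bool := fun x => !pvIsMSH x

-- A's loop body restricted to already-stripped, non-empty lines
def pvStepC (acc : List String × List String) (s : String) : List String × List String :=
  if pvIsMSH s then
    ((if acc.2 ≠ [] then acc.1 ++ [PySem.Str.join "\n" acc.2] else acc.1), [s])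
  else
    (acc.1, if acc.2 ≠ [] then acc.2 ++ [s] else acc.2)

-- A's epilogue ('don't forget the last message')
def pvFinish (acc : List String × List String) : List String :=
  if acc.2 ≠ [] then acc.1 ++ [PySem.Str.join "\n" acc.2] else acc.1

-- common ground: chunk the cleaned line list at MSH boundaries
def pvChunks (ls : List String) : List (List String) :=
  match ls with
  | [] => []
  | l :: rest =>
    if pvIsMSH l then
      (l :: rest.takeWhile pvP) :: pvChunks (rest.dropWhile pvP)
    else pvChunks rest
termination_by ls.length
decreasing_by
  · have := List.length_dropWhile_le pvP rest
    simp only [List.length_cons]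
    omega
  · simp

theorem pv_foldA_eq_foldC (raw : List String) (acc : List String × List String) :
    raw.foldl pvStepA acc =
      ((raw.map PySem.Str.strip).filter (fun s => s ≠ "")).foldl pvStepC acc := by
  induction raw generalizing acc with
  | nil => rfl
  | cons l t ih =>
    by_cases h : PySem.Str.strip l = ""
    · have hstep : pvStepA acc l = acc := by simp [pvStepA, h]
      simp only [List.foldl_cons, List.map_cons, List.filter_cons, h, hstep]
      simp [ih]
    · have hstep : pvStepA acc l = pvStepC acc (PySem.Str.strip l) := by
        simp [pvStepA, pvStepC, pvIsMSH, h]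
      simp only [List.foldl_cons, List.map_cons, List.filter_cons, hstep]
      simp only [h, decide_not, ih]
      simp

theorem pv_A2 (ls : List String) (msgs cur : List String) (hcur : cur ≠ []) :
    pvFinish (ls.foldl pvStepC (msgs, cur)) =
      msgs ++ PySem.Str.join "\n" (cur ++ ls.takeWhile pvP) ::
        (pvChunks (ls.dropWhile pvP)).map (PySem.Str.join "\n") := by
  induction ls generalizing msgs cur with
  | nil => simp [pvFinish, pvChunks, hcur]
  | cons l t ih =>
    by_cases hm : pvIsMSH l
    · have hstep : pvStepC (msgs, cur) l = (msgs ++ [PySem.Str.join "\n" cur], [l]) := by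
        simp [pvStepC, hm, hcur]
      rw [List.foldl_cons, hstep, ih _ _ (by simp)]
      have hp : pvP l = false := by simp [pvP, hm]
      simp [pvChunks, hm, hp]
    · have hstep : pvStepC (msgs, cur) l = (msgs, cur ++ [l]) := by
        simp [pvStepC, hm, hcur]
      rw [List.foldl_cons, hstep, ih _ _ (by simp [hcur])]
      have hp : pvP l = true := by simp [pvP, hm]
      simp [hp]

theorem pv_A1 (ls : List String) (msgs : List String) :
    pvFinish (ls.foldl pvStepC (msgs, [])) =
      msgs ++ (pvChunks ls).map (PySem.Str.join "\n") := by
  induction ls generalizing msgs with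
  | nil => simp [pvFinish, pvChunks]
  | cons l t ih =>
    by_cases hm : pvIsMSH l
    · have hstep : pvStepC (msgs, []) l = (msgs, [l]) := by simp [pvStepC, hm]
      rw [List.foldl_cons, hstep, pv_A2 t msgs [l] (by simp)]
      simp [pvChunks, hm]
    · have hstep : pvStepC (msgs, []) l = (msgs, []) := by simp [pvStepC, hm]
      rw [List.foldl_cons, hstep, ih msgs]
      simp [pvChunks, hm]

theorem pvSkip_eq (ls : List String) (i : Nat) :
    pvSkip ls i = i + ((ls.drop i).takeWhile pvP).length := by
  unfold pvSkip
  split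
  · rename_i h
    rw [List.drop_eq_getElem_cons h]
    split
    · rename_i hm
      have hp : pvP ls[i] = false := by simp [pvP, hm]
      rw [List.takeWhile_cons_of_neg (by simp [hp])]
      simp
    · rename_i hm
      have hp : pvP ls[i] = true := by simp [pvP, hm]
      rw [List.takeWhile_cons_of_pos hp, pvSkip_eq ls (i + 1), List.length_cons]
      omega
  · rename_i h
    rw [List.drop_eq_nil_of_le (by omega)]
    simp
termination_by ls.length - i

-- after the skip loop, the index sits at the end or on an MSH line
theorem pvSkip_pos (ls : List String) (i : Nat) (hle : i ≤ ls.length) :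
    pvSkip ls i = ls.length ∨ ∃ h' : pvSkip ls i < ls.length, pvIsMSH ls[pvSkip ls i] := by
  unfold pvSkip
  split
  · rename_i h
    split
    · rename_i hm
      exact Or.inr ⟨h, hm⟩
    · exact pvSkip_pos ls (i + 1) (by omega)
  · rename_i h
    exact Or.inl (by omega)
termination_by ls.length - i

theorem pv_take_tw {α : Type} (p : α → Bool) (l : List α) :
    l.take (l.takeWhile p).length = l.takeWhile p := by
  induction l with
  | nil => simp
  | cons a t ih => by_cases h : p a <;> simp [h, ih]

theorem pv_drop_tw {α : Type} (p : α → Bool) (l : List α) :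
    l.drop (l.takeWhile p).length = l.dropWhile p := by
  induction l with
  | nil => simp
  | cons a t ih =>
    by_cases h : p a <;> simp [h, ih]

theorem pvOuter_eq (ls : List String) (i : Nat)
    (hpos : i = ls.length ∨ ∃ h' : i < ls.length, pvIsMSH ls[i]) :
    pvOuter ls i = (pvChunks (ls.drop i)).map (PySem.Str.join "\n") := by
  unfold pvOuter
  split
  · rename_i hlt
    obtain h | ⟨_, hm⟩ := hpos
    · omega
    have hd : ls.drop i = ls[i] :: ls.drop (i + 1) := List.drop_eq_getElem_cons hlt
    have htwle : ((ls.drop (i + 1)).takeWhile pvP).length ≤ ls.length - (i + 1) := by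
      have := (List.takeWhile_prefix (l := ls.drop (i + 1)) pvP).length_le
      simpa using this
    have hskip : pvSkip ls (i + 1) = (i + 1) + ((ls.drop (i + 1)).takeWhile pvP).length :=
      pvSkip_eq ls (i + 1)
    have hslice : PySem.List.slice ls (some (i : Int)) (some ((pvSkip ls (i + 1)) : Int)) =
        ls[i] :: (ls.drop (i + 1)).takeWhile pvP := by
      rw [PySem.List.slice_natCast, hskip, hd]
      rw [show i + 1 + ((ls.drop (i + 1)).takeWhile pvP).length - i
          = ((ls.drop (i + 1)).takeWhile pvP).length + 1 from by omega]
      rw [List.take_succ_cons, pv_take_tw]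
    have hdropj : ls.drop (pvSkip ls (i + 1)) = (ls.drop (i + 1)).dropWhile pvP := by
      have h3 := pv_drop_tw pvP (ls.drop (i + 1))
      rw [List.drop_drop] at h3
      rw [hskip]
      convert h3 using 2
    rw [pvOuter_eq ls (pvSkip ls (i + 1)) (pvSkip_pos ls (i + 1) (by omega))]
    rw [hslice, hdropj, hd]
    generalize ls.drop (i + 1) = rest
    simp [pvChunks, hm]
  · rename_i hlt
    obtain h | ⟨h', _⟩ := hpos
    · rw [List.drop_eq_nil_of_le (by omega)]
      simp [pvChunks]
    · omega
termination_by ls.length - i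
decreasing_by
  have := pvSkip_ge ls (i + 1)
  omega

theorem pvChunks_dropWhile (ls : List String) :
    pvChunks ls = pvChunks (ls.dropWhile pvP) := by
  induction ls with
  | nil => simp
  | cons l t ih =>
    by_cases hm : pvIsMSH l
    · have hp : pvP l = false := by simp [pvP, hm]
      rw [List.dropWhile_cons_of_neg (by simp [hp])]
    · have hp : pvP l = true := by simp [pvP, hm]
      rw [List.dropWhile_cons_of_pos hp, ← ih]
      simp [pvChunks, hm]

-- ===== VERDICT (by name: the statement is the Claim_ definition above) =====
theorem split_hl7_messages_spec : Claim_equal_split_hl7_messages := by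
  intro content _
  unfold Spec_split_hl7_messages
  show split_hl7_messages content = split_hl7_messages_alt content
  have key : ∀ raw : List String,
      pvFinish (raw.foldl pvStepA ([], [])) =
        pvOuter ((raw.map PySem.Str.strip).filter (fun s => s ≠ ""))
          (pvSkip ((raw.map PySem.Str.strip).filter (fun s => s ≠ "")) 0) := by
    intro raw
    set ls := (raw.map PySem.Str.strip).filter (fun s => s ≠ "") with hls
    rw [pv_foldA_eq_foldC, ← hls, pv_A1, pvChunks_dropWhile]
    have h0 : pvSkip ls 0 = (ls.takeWhile pvP).length := by simpa using pvSkip_eq ls 0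
    rw [pvOuter_eq ls (pvSkip ls 0) (pvSkip_pos ls 0 (by omega))]
    rw [h0, pv_drop_tw]
    simp
  exact key ((PySem.Str.split? (PySem.Str.replace (PySem.Str.replace content "\r\n" "\n") "\r" "\n") "\n").getD [])
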